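-- pv_equiv track=rewrite | github.com/patkamon/band-assignment | superman.py | re_superman
-- ===== SOURCE A (Python) =====
-- def re_superman(n, k, arr):
--     # stack represent list of chicken that are under roof (right now are first chicken)
--     stack = [arr[0]]
--     # mx represent max number of chickends under roof (right now is 1)
--     mx = 1
--     # loop from second to last chicken
--     for i in range(1,n):
--         # if current chick are under roof then add it in stack
--         if (stack[0] +k) -1 >= arr[i]:
--             stack.append(arr[i])
--         # if not
--         else:
--             # first update mx if it more than current
--             mx = max(mx, len(stack))
--             # loop and popout first chicken until it pass atleast one condition
--             # allow current chicken to share the same roof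
--             # there is no chicken under roof
--             while stack != []:
--                 if (stack[0] +k) -1 >= arr[i]:
--                     break
--                 stack = stack[1:]
--             # add current chicken to the stack
--             stack.append(arr[i])
--     # update mx again
--     mx = max(mx, len(stack))
--
--     return mx
-- ===== SOURCE B (Python) =====
-- def re_superman(n, k, arr):
--     # Two-pointer sliding window: l is the index of the leftmost chicken
--     # still under the roof; no list is ever copied.
--     l = 0
--     mx = 1
--     for i in range(1, n):
--         if arr[l] + k - 1 < arr[i]:
--             mx = max(mx, i - l)
--             while l < i and arr[l] + k - 1 < arr[i]:
--                 l += 1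
--     return max(mx, n - l)
-- ===== Notes on version B (the rewrite author's own statement) =====
-- stated objective: faster
-- what changed: Replaced the explicit window list (appends plus repeated front-slicing stack = stack[1:]) by a two-pointer sliding window that keeps only the integer index of the leftmost chicken, so no list is ever built or copied.
import Mathlib
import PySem

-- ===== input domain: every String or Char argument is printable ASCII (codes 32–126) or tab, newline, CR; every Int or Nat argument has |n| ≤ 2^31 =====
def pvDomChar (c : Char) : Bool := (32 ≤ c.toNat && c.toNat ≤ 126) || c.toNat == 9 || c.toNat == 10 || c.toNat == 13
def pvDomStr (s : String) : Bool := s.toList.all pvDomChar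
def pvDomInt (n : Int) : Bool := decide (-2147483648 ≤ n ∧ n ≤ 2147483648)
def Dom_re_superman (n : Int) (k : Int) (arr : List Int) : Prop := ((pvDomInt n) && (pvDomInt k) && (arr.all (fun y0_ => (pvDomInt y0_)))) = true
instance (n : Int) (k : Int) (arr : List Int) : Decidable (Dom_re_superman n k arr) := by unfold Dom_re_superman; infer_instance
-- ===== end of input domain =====

-- B replaces A's explicit window list (with its repeated front slicing) by a
-- two-pointer sliding window keeping only the left index; no list is built or copied.

-- ===== PORT A =====
-- inner 'while stack != []: if stack[0]+k-1 >= x: break; stack = stack[1:]'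
-- (stack[1:] of a nonempty list is exactly its tail)
def pvPopA (k x : Int) : List Int → List Int
  | [] => []
  | h :: t => if h + k - 1 ≥ x then h :: t else pvPopA k x t

-- body of A's 'for i in range(1, n)' loop, state (stack, mx)
def pvStepA (k : Int) (arr : List Int) (st : List Int × Int) (i : Int) : List Int × Int :=
  if PySem.List.pyGetD st.1 0 0 + k - 1 ≥ PySem.List.pyGetD arr i 0 then
    (st.1 ++ [PySem.List.pyGetD arr i 0], st.2)
  else
    let mx := max st.2 (st.1.length : Int)
    let stack := pvPopA k (PySem.List.pyGetD arr i 0) st.1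
    (stack ++ [PySem.List.pyGetD arr i 0], mx)

def re_superman (n : Int) (k : Int) (arr : List Int) : Int :=
  let s := (PySem.List.pyRange 1 n 1).foldl (pvStepA k arr) ([PySem.List.pyGetD arr 0 0], (1 : Int))
  max s.2 (s.1.length : Int)

-- ===== PORT B =====
-- 'while l < i and arr[l] + k - 1 < x: l += 1'
def pvAdvB (k x : Int) (arr : List Int) (l i : Int) : Int :=
  if h : l < i ∧ PySem.List.pyGetD arr l 0 + k - 1 < x then pvAdvB k x arr (l + 1) i else l
termination_by (i - l).toNat
decreasing_by omega

-- body of B's loop, state (l, mx)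
def pvStepB (k : Int) (arr : List Int) (st : Int × Int) (i : Int) : Int × Int :=
  if PySem.List.pyGetD arr st.1 0 + k - 1 < PySem.List.pyGetD arr i 0 then
    (pvAdvB k (PySem.List.pyGetD arr i 0) arr st.1 i, max st.2 (i - st.1))
  else st

def re_superman_alt (n : Int) (k : Int) (arr : List Int) : Int :=
  let s := (PySem.List.pyRange 1 n 1).foldl (pvStepB k arr) ((0 : Int), (1 : Int))
  max s.2 (n - s.1)

-- ===== PRECONDITION & SPEC =====
-- A raises IndexError on arr = [] (arr[0]) and whenever n > len(arr) (arr[i] in the loop).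
def Pre_re_superman (n : Int) (k : Int) (arr : List Int) : Prop :=
  arr ≠ [] ∧ n ≤ (arr.length : Int)
instance (n : Int) (k : Int) (arr : List Int) : Decidable (Pre_re_superman n k arr) := by
  unfold Pre_re_superman; infer_instance

def pvWitness_re_superman : Int × Int × List Int := (4, 3, [1, 2, 5, 6])

def Spec_re_superman (n : Int) (k : Int) (arr : List Int) (out : Int) : Prop := out = re_superman_alt n k arr
instance (n : Int) (k : Int) (arr : List Int) (out : Int) : Decidable (Spec_re_superman n k arr out) := by unfold Spec_re_superman; infer_instance

-- ===== CLAIM (what is proved, stated in full; the proofs are below) =====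
def Claim_equal_re_superman : Prop := ∀ (n : Int) (k : Int) (arr : List Int), Dom_re_superman n k arr → Pre_re_superman n k arr → Spec_re_superman n k arr (re_superman n k arr)

-- ===== LEMMAS AND PROOFS =====

-- invariant tying A's state (stack, mx) to B's state (l, mx) after processing range(1, m)
def pvInv (arr : List Int) (m : Nat) (sA : List Int × Int) (sB : Int × Int) : Prop :=
  ∃ l : Nat, sB.1 = (l : Int) ∧ l < m ∧ sA.1 = (arr.drop l).take (m - l) ∧ sA.2 = sB.2

theorem pvPop_adv (k x : Int) (arr : List Int) :
    ∀ (c l m : Nat), m - l = c → l ≤ m → m ≤ arr.length →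
      ∃ l' : Nat, pvAdvB k x arr (l : Int) (m : Int) = (l' : Int) ∧ l' ≤ m ∧
        pvPopA k x ((arr.drop l).take (m - l)) = (arr.drop l').take (m - l') := by
  intro c
  induction c with
  | zero =>
      intro l m hc hlm _
      have hl : l = m := by omega
      subst hl
      refine ⟨l, ?_, le_refl _, ?_⟩
      · rw [pvAdvB]; simp
      · simp [pvPopA]
  | succ c ih =>
      intro l m hc hlm hml
      have hlm' : l < m := by omega
      have hlarr : l < arr.length := by omega
      have hwin : (arr.drop l).take (m - l) = arr[l] :: (arr.drop (l + 1)).take (m - (l + 1)) := by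
        rw [List.drop_eq_getElem_cons hlarr]
        have : m - l = (m - (l + 1)) + 1 := by omega
        rw [this, List.take_succ_cons]
      by_cases hcond : arr[l] + k - 1 ≥ x
      · refine ⟨l, ?_, le_of_lt hlm', ?_⟩
        · have hno : ¬ ((l : Int) < (m : Int) ∧ PySem.List.pyGetD arr (l : Int) 0 + k - 1 < x) := by
            rw [PySem.List.pyGetD_natCast, List.getD_eq_getElem?_getD, List.getElem?_eq_getElem hlarr]
            simp only [Option.getD_some]
            omega
          rw [pvAdvB, dif_neg hno]
        · rw [hwin, pvPopA]
          simp [hcond, ← hwin]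
      · have hyes : ((l : Int) < (m : Int) ∧ PySem.List.pyGetD arr (l : Int) 0 + k - 1 < x) := by
          constructor
          · exact_mod_cast hlm'
          · rw [PySem.List.pyGetD_natCast, List.getD_eq_getElem?_getD, List.getElem?_eq_getElem hlarr]
            simp only [Option.getD_some]
            omega
        have step : pvAdvB k x arr (l : Int) (m : Int) = pvAdvB k x arr ((l + 1 : Nat) : Int) (m : Int) := by
          rw [pvAdvB, dif_pos hyes]
          push_cast
          rfl
        obtain ⟨l', h1, h2, h3⟩ := ih (l + 1) m (by omega) (by omega) hml
        refine ⟨l', by rw [step]; exact h1, h2, ?_⟩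
        rw [hwin, pvPopA]
        simp only [ge_iff_le, if_neg (by omega : ¬ x ≤ arr[l] + k - 1)]
        exact h3

theorem pvWindow_append (arr : List Int) (l m : Nat) (hl : l ≤ m) (hm : m < arr.length) :
    (arr.drop l).take (m - l) ++ [arr[m]] = (arr.drop l).take (m + 1 - l) := by
  have h1 : m + 1 - l = (m - l) + 1 := by omega
  rw [h1, List.take_add_one]
  have hidx : l + (m - l) = m := by omega
  have h2 : (arr.drop l)[m - l]? = some arr[m] := by
    rw [List.getElem?_drop, hidx, List.getElem?_eq_getElem hm]
  simp [h2]

theorem pvMain (k : Int) (arr : List Int) :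
    ∀ m : Nat, 1 ≤ m → m ≤ arr.length →
      pvInv arr m
        ((PySem.List.pyRange 1 (m : Int) 1).foldl (pvStepA k arr) ([PySem.List.pyGetD arr 0 0], (1 : Int)))
        ((PySem.List.pyRange 1 (m : Int) 1).foldl (pvStepB k arr) ((0 : Int), (1 : Int))) := by
  intro m
  induction m with
  | zero => intro h; omega
  | succ m ih =>
      intro _ hm1
      by_cases hm : 1 ≤ m
      · -- peel the last index i = m from the range
        have hsplit : PySem.List.pyRange 1 ((m + 1 : Nat) : Int) 1
            = PySem.List.pyRange 1 (m : Int) 1 ++ [(m : Int)] := by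
          push_cast
          exact PySem.List.pyRange_one_succ_right (by exact_mod_cast hm)
        obtain ⟨l, hB, hlm, hstack, hmx⟩ := ih hm (by omega)
        rw [hsplit, List.foldl_append, List.foldl_append]
        simp only [List.foldl_cons, List.foldl_nil]
        set sA := (PySem.List.pyRange 1 (m : Int) 1).foldl (pvStepA k arr) ([PySem.List.pyGetD arr 0 0], (1 : Int)) with hsA
        set sB := (PySem.List.pyRange 1 (m : Int) 1).foldl (pvStepB k arr) ((0 : Int), (1 : Int)) with hsB
        have hmlen : m < arr.length := by omega
        have hllen : l < arr.length := by omega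
        have hhead : PySem.List.pyGetD sA.1 0 0 = arr[l] := by
          rw [hstack]
          have hw : (arr.drop l).take (m - l) = arr[l] :: (arr.drop (l + 1)).take (m - (l + 1)) := by
            rw [List.drop_eq_getElem_cons hllen]
            have : m - l = (m - (l + 1)) + 1 := by omega
            rw [this, List.take_succ_cons]
          rw [hw]
          simp [PySem.List.pyGetD_zero]
        have hxl : PySem.List.pyGetD arr sB.1 0 = arr[l] := by
          rw [hB, PySem.List.pyGetD_natCast, List.getD_eq_getElem?_getD, List.getElem?_eq_getElem hllen]
          simp
        have hxm : PySem.List.pyGetD arr (m : Int) 0 = arr[m] := by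
          rw [PySem.List.pyGetD_natCast, List.getD_eq_getElem?_getD, List.getElem?_eq_getElem hmlen]
          simp
        have hlen_stack : (sA.1.length : Int) = (m : Int) - (l : Int) := by
          rw [hstack]
          rw [List.length_take, List.length_drop]
          have : min (m - l) (arr.length - l) = m - l := by omega
          rw [this]
          omega
        by_cases hcond : arr[l] + k - 1 ≥ arr[m]
        · -- chicken fits under current roof: A appends, B leaves l unchanged
          unfold pvStepA pvStepB
          rw [hhead, hxl, hxm]
          simp only [hcond, if_pos, if_neg (by omega : ¬ arr[l] + k - 1 < arr[m])]
          refine ⟨l, hB, by omega, ?_, hmx⟩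
          show sA.1 ++ [arr[m]] = _
          rw [hstack]
          exact pvWindow_append arr l m (by omega) hmlen
        · -- roof moved: A pops from the front, B advances l
          unfold pvStepA pvStepB
          rw [hhead, hxl, hxm]
          simp only [if_neg (by omega : ¬ arr[l] + k - 1 ≥ arr[m]),
            if_pos (by omega : arr[l] + k - 1 < arr[m])]
          obtain ⟨l', h1, h2, h3⟩ := pvPop_adv k arr[m] arr (m - l) l m rfl (by omega) (by omega)
          refine ⟨l', ?_, by omega, ?_, ?_⟩
          · show pvAdvB k arr[m] arr sB.1 (m : Int) = (l' : Int)
            rw [hB]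
            exact h1
          · show pvPopA k arr[m] sA.1 ++ [arr[m]] = _
            rw [hstack, h3]
            exact pvWindow_append arr l' m h2 hmlen
          · show max sA.2 (sA.1.length : Int) = max sB.2 ((m : Int) - sB.1)
            rw [hmx, hlen_stack, hB]
      · -- m = 0, so m + 1 = 1: empty range, initial states
        have hm0 : m = 0 := by omega
        subst hm0
        have hr : PySem.List.pyRange 1 ((1 : Nat) : Int) 1 = [] :=
          PySem.List.pyRange_one_eq_nil (by norm_num)
        rw [hr]
        simp only [List.foldl_nil]
        refine ⟨0, rfl, by omega, ?_, rfl⟩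
        have h0 : 0 < arr.length := by omega
        rw [PySem.List.pyGetD_zero, List.getD_eq_getElem?_getD, List.getElem?_eq_getElem h0]
        cases arr with
        | nil => simp at h0
        | cons a t => simp

-- ===== VERDICT (by name: the statement is the Claim_ definition above) =====
theorem re_superman_spec : Claim_equal_re_superman := by
  intro n k arr _ hpre
  obtain ⟨hne, hlen⟩ := hpre
  unfold Spec_re_superman re_superman re_superman_alt
  by_cases hn : n ≤ 1
  · rw [PySem.List.pyRange_one_eq_nil hn]
    simp only [List.foldl_nil, List.length_cons, List.length_nil]
    have : n - 0 ≤ 1 := by omega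
    omega
  · have hm1 : 1 ≤ n.toNat := by omega
    have hmn : (n.toNat : Int) = n := by omega
    have hmlen : n.toNat ≤ arr.length := by omega
    obtain ⟨l, hB, hlm, hstack, hmx⟩ := pvMain k arr n.toNat hm1 hmlen
    rw [← hmn]
    simp only []
    rw [hstack, hB, hmx]
    have : (((arr.drop l).take (n.toNat - l)).length : Int) = (n.toNat : Int) - (l : Int) := by
      rw [List.length_take, List.length_drop]
      have : min (n.toNat - l) (arr.length - l) = n.toNat - l := by omega
      rw [this]
      omega
    rw [this]
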